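-- pv_equiv track=rewrite | github.com/P0rtOs/BIS | lab3/lab3.py | num_bytes
-- ===== SOURCE A (Python) =====
-- def num_bytes(x: int) -> int:
--     if x == 0:
--         return 1
--     t = -x if x < 0 else x
--     bytes_cnt = 0
--     while t > 0:
--         t >>= 8
--         bytes_cnt += 1
--     return bytes_cnt
-- ===== SOURCE B (Python) =====
-- def num_bytes(x: int) -> int:
--     if x == 0:
--         return 1
--     return (abs(x).bit_length() + 7) // 8
-- ===== Notes on version B (the rewrite author's own statement) =====
-- stated objective: idiomatic
-- what changed: Replaces the shift-by-8 counting loop with the closed form (abs(x).bit_length() + 7) // 8, keeping the x == 0 guard; no loop over bytes at all.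
import Mathlib
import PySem

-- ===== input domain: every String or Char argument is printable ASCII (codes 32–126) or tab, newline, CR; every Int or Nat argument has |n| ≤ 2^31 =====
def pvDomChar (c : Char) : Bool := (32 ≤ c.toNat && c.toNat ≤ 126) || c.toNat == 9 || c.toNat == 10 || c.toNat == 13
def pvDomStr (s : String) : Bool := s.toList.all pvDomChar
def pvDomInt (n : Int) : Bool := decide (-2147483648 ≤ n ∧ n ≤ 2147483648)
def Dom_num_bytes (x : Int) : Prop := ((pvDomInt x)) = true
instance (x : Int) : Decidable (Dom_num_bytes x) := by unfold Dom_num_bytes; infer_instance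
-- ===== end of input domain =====

-- B replaces A's shift-by-8 counting loop with the closed form (abs(x).bit_length() + 7) // 8 (idiomatic).

-- ===== PORT A =====
-- A's while loop 'while t > 0: t >>= 8; bytes_cnt += 1' on the nonnegative magnitude t
def pvLoopA (t : Nat) : Nat :=
  if h : 0 < t then pvLoopA (t >>> 8) + 1 else 0
termination_by t
decreasing_by
  simp only [Nat.shiftRight_eq_div_pow]
  exact Nat.div_lt_self h (by norm_num)

def num_bytes (x : Int) : Int :=
  if x = 0 then 1
  else
    let t : Nat := (if x < 0 then -x else x).toNat
    (pvLoopA t : Int)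

-- ===== PORT B =====
def num_bytes_alt (x : Int) : Int :=
  if x = 0 then 1
  else PySem.Int.floordiv ((PySem.Int.bitLength |x| : Int) + 7) 8

-- ===== PRECONDITION & SPEC =====
def Spec_num_bytes (x : Int) (out : Int) : Prop := out = num_bytes_alt x
instance (x : Int) (out : Int) : Decidable (Spec_num_bytes x out) := by unfold Spec_num_bytes; infer_instance

-- ===== CLAIM (what is proved, stated in full; the proofs are below) =====
def Claim_equal_num_bytes : Prop := ∀ (x : Int), Dom_num_bytes x → Spec_num_bytes x (num_bytes x)

-- ===== LEMMAS AND PROOFS =====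

theorem pvBitLen_half (m : Nat) :
    PySem.Int.bitLength ((m / 2 : Nat) : Int) = PySem.Int.bitLength (m : Int) - 1 := by
  rcases Nat.eq_zero_or_pos m with h | h
  · subst h; simp
  · rw [PySem.Int.bitLength_natCast h]; omega

theorem pvBitLen_pos (m : Nat) (h : 0 < m) : 1 ≤ PySem.Int.bitLength (m : Int) := by
  rw [PySem.Int.bitLength_natCast h]; omega

theorem pvBitLen_div256 (m : Nat) :
    PySem.Int.bitLength ((m / 256 : Nat) : Int) = PySem.Int.bitLength (m : Int) - 8 := by
  have e : m / 256 = m / 2 / 2 / 2 / 2 / 2 / 2 / 2 / 2 := by omega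
  rw [e, pvBitLen_half, pvBitLen_half, pvBitLen_half, pvBitLen_half, pvBitLen_half,
    pvBitLen_half, pvBitLen_half, pvBitLen_half]
  omega

theorem pvLoopA_eq (t : Nat) : pvLoopA t = (PySem.Int.bitLength (t : Int) + 7) / 8 := by
  induction t using Nat.strong_induction_on with
  | _ t ih =>
    rcases Nat.eq_zero_or_pos t with h | h
    · subst h; rw [pvLoopA]; simp
    · rw [pvLoopA]
      simp only [h, dif_pos]
      have hsh : t >>> 8 = t / 256 := by
        simp [Nat.shiftRight_eq_div_pow]
      rw [hsh, ih (t / 256) (Nat.div_lt_self h (by norm_num)), pvBitLen_div256]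
      have := pvBitLen_pos t h
      omega

-- ===== VERDICT (by name: the statement is the Claim_ definition above) =====
theorem num_bytes_spec : Claim_equal_num_bytes := by
  intro x _
  unfold Spec_num_bytes num_bytes num_bytes_alt
  by_cases hx : x = 0
  · simp [hx]
  · simp only [hx, if_false]
    have ht : (if x < 0 then -x else x).toNat = x.natAbs := by
      split <;> omega
    have habs : |x| = ((x.natAbs : Nat) : Int) := by
      rw [Int.abs_eq_natAbs]
    rw [ht, habs, pvLoopA_eq,
      PySem.Int.floordiv_eq_ediv_of_pos (b := 8) (by norm_num)]
    omega
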